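-- pv_equiv track=rewrite | github.com/mohammadfaiizan/ProjectI | DSA/Problem/Graph/09_Bipartite_Graphs_Matching/1349_Maximum_Students_Taking_Exam.py | maxStudents_approach1_backtracking_complete
-- ===== SOURCE A (Python) =====
-- from typing import List, Dict, Set, Tuple, Optional
--
-- def maxStudents_approach1_backtracking_complete(seats: List[List[str]]) -> int:
--     """
--     Approach 1: Complete Backtracking Search
--
--     Try all possible valid seat assignments.
--
--     Time: O(2^(m*n)) in worst case
--     Space: O(m*n) for recursion
--     """
--     m, n = len(seats), len(seats[0])
--
--     def is_valid_placement(row, col, current_assignment):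
--         """Check if placing student at (row, col) is valid"""
--         if seats[row][col] == '#':
--             return False
--
--         # Check all cheating directions
--         directions = [(-1, -1), (-1, 1), (0, -1), (0, 1)]  # upper-left, upper-right, left, right
--
--         for dr, dc in directions:
--             nr, nc = row + dr, col + dc
--             if 0 <= nr < m and 0 <= nc < n:
--                 if current_assignment[nr][nc]:
--                     return False
--
--         return True
--
--     def backtrack(row, col, current_assignment, current_count):
--         """Backtrack through all positions"""
--         if row == m:
--             return current_count
--
--         # Calculate next position
--         next_row, next_col = (row, col + 1) if col + 1 < n else (row + 1, 0)
--
--         max_students = 0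
--
--         # Option 1: Don't place student at current position
--         max_students = max(max_students, backtrack(next_row, next_col, current_assignment, current_count))
--
--         # Option 2: Place student at current position (if valid)
--         if is_valid_placement(row, col, current_assignment):
--             current_assignment[row][col] = True
--             max_students = max(max_students, backtrack(next_row, next_col, current_assignment, current_count + 1))
--             current_assignment[row][col] = False
--
--         return max_students
--
--     # Initialize assignment matrix
--     assignment = [[False] * n for _ in range(m)]
--     return backtrack(0, 0, assignment, 0)
-- ===== SOURCE B (Python) =====
-- from typing import List
--
--
-- def maxStudents_approach1_backtracking_complete(seats: List[List[str]]) -> int: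
--     """
--     Row bitmask formulation: for each row enumerate the masks of mutually
--     non-adjacent available seats once, then recurse row by row, keeping only
--     the previous row's mask (diagonal compatibility) instead of a mutable
--     m x n assignment matrix searched cell by cell.
--     """
--     m, n = len(seats), len(seats[0])
--
--     def valid_masks(row):
--         result = []
--         for mask in range(1 << n):
--             if mask & (mask << 1):
--                 continue
--             if all(not ((mask >> c) & 1) or row[c] != '#' for c in range(n)):
--                 result.append(mask)
--         return result
--
--     rows_masks = [valid_masks(row) for row in seats]
--
--     def best(i, prev):
--         if i == m:
--             return 0
--         cands = [bin(mask).count('1') + best(i + 1, mask)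
--                  for mask in rows_masks[i]
--                  if not (mask & (prev << 1)) and not (mask & (prev >> 1))]
--         return max(cands, default=0)
--
--     return best(0, 0)
-- ===== Notes on version B (the rewrite author's own statement) =====
-- stated objective: faster
-- what changed: A backtracks cell by cell over a mutable m×n boolean assignment matrix, re-checking four neighbour directions at every cell; B enumerates, once per row, the bitmasks of pairwise non-adjacent available seats and recurses row by row keeping only the previous row's mask, checking diagonal compatibility with two shifts.
import Mathlib
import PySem

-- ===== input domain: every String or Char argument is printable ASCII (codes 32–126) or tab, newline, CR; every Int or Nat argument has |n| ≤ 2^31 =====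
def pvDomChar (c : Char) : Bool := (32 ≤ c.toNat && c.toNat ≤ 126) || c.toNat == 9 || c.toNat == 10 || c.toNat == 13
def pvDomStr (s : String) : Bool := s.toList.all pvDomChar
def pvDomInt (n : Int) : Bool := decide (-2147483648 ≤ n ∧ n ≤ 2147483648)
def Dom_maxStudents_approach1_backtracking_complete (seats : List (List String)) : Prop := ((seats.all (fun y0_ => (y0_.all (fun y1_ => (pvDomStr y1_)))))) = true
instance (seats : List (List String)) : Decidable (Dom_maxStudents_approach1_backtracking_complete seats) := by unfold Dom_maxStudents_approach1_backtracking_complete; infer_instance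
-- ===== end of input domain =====

-- B replaces A's cell-by-cell backtracking over a mutable m×n matrix by a row-by-row
-- recursion over bitmasks of valid non-adjacent rows (return value only; A restores its
-- matrix before returning, so there is no observable mutation).

-- ===== PORT A =====
-- literal port of A's nested `is_valid_placement`
def pvA_isValid (seats : List (List String)) (m n row col : Nat)
    (assign : List (List Bool)) : Bool :=
  if ((seats.getD row []).getD col "") == "#" then false
  else
    -- directions = [(-1,-1),(-1,1),(0,-1),(0,1)]; `any` mirrors the early `return False`
    !([((-1 : Int), (-1 : Int)), (-1, 1), (0, -1), (0, 1)].any (fun d =>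
      let nr : Int := (row : Int) + d.1
      let nc : Int := (col : Int) + d.2
      decide (0 ≤ nr) && decide (nr < (m : Int)) && decide (0 ≤ nc) && decide (nc < (n : Int))
        && ((assign.getD nr.toNat []).getD nc.toNat false)))

-- literal port of A's nested `backtrack` (Python tests `row == m`; `m ≤ row` is the same
-- on every reachable call since row ≤ m throughout, and makes termination evident)
def pvA_backtrack (seats : List (List String)) (m n row col : Nat)
    (assign : List (List Bool)) (count : Int) : Int :=
  if m ≤ row then count
  else
    let nr := if col + 1 < n then row else row + 1
    let nc := if col + 1 < n then col + 1 else 0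
    let ms : Int := max 0 (pvA_backtrack seats m n nr nc assign count)
    if pvA_isValid seats m n row col assign then
      max ms (pvA_backtrack seats m n nr nc
        (assign.set row ((assign.getD row []).set col true)) (count + 1))
    else ms
termination_by (m - row, n - col)
decreasing_by all_goals (split_ifs <;> first | (apply Prod.Lex.right; omega) | (apply Prod.Lex.left; omega))

def maxStudents_approach1_backtracking_complete (seats : List (List String)) : Int :=
  let m := seats.length
  let n := (seats.getD 0 []).length   -- seats[0]: IndexError on [] is excluded by Pre_
  let assignment := List.replicate m (List.replicate n false)
  pvA_backtrack seats m n 0 0 assignment 0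

-- ===== PORT B =====
-- bin(mask).count('1') of Source B, ported as a popcount helper
def pvPopcount (k : Nat) : Nat :=
  if k = 0 then 0 else k % 2 + pvPopcount (k / 2)
decreasing_by exact Nat.div_lt_self (by omega) (by omega)

-- Source B `valid_masks(row)`
def pvB_validMasks (n : Nat) (row : List String) : List Nat :=
  (List.range (1 <<< n)).filter (fun mask =>
    (mask &&& (mask <<< 1) == 0) &&
    ((List.range n).all (fun c =>
      ((mask >>> c) &&& 1 == 0) || ((row.getD c "") != "#"))))

-- Source B `best(i, prev)` (Python tests `i == m`; `m ≤ i` is the same on every reachable call)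
def pvB_best (m : Nat) (rowsMasks : List (List Nat)) (i prev : Nat) : Int :=
  if m ≤ i then 0
  else
    let cands := ((rowsMasks.getD i []).filter (fun mask =>
        (mask &&& (prev <<< 1) == 0) && (mask &&& (prev >>> 1) == 0))).map
      (fun mask => (pvPopcount mask : Int) + pvB_best m rowsMasks (i + 1) mask)
    (cands.max?).getD 0
termination_by m - i
decreasing_by omega

def maxStudents_approach1_backtracking_complete_alt (seats : List (List String)) : Int :=
  let m := seats.length
  let n := (seats.getD 0 []).length
  let rowsMasks := seats.map (fun row => pvB_validMasks n row)
  pvB_best m rowsMasks 0 0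

-- ===== PRECONDITION & SPEC =====
-- Pre_ excludes exactly the inputs where Python A raises IndexError: the empty grid,
-- a zero-width first row (seats[row][col] is then out of range), and rows shorter than row 0.
def Pre_maxStudents_approach1_backtracking_complete (seats : List (List String)) : Prop :=
  seats ≠ [] ∧ 0 < (seats.getD 0 []).length ∧
    ∀ r ∈ seats, (seats.getD 0 []).length ≤ r.length
instance (seats : List (List String)) : Decidable (Pre_maxStudents_approach1_backtracking_complete seats) := by
  unfold Pre_maxStudents_approach1_backtracking_complete; infer_instance

def pvWitness_maxStudents_approach1_backtracking_complete : List (List String) :=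
  [[".", "#"], ["#", "."]]

def Spec_maxStudents_approach1_backtracking_complete (seats : List (List String)) (out : Int) : Prop := out = maxStudents_approach1_backtracking_complete_alt seats
instance (seats : List (List String)) (out : Int) : Decidable (Spec_maxStudents_approach1_backtracking_complete seats out) := by unfold Spec_maxStudents_approach1_backtracking_complete; infer_instance

-- ===== CLAIM (what is proved, stated in full; the proofs are below) =====
def Claim_equal_maxStudents_approach1_backtracking_complete : Prop := ∀ (seats : List (List String)), Dom_maxStudents_approach1_backtracking_complete seats → Pre_maxStudents_approach1_backtracking_complete seats → Spec_maxStudents_approach1_backtracking_complete seats (maxStudents_approach1_backtracking_complete seats)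


-- ===== LEMMAS AND PROOFS =====

-- the value of cell (j, c) of the assignment matrix
def pvGet (a : List (List Bool)) (j c : Nat) : Bool := (a.getD j []).getD c false

-- the bitmask encoded by one row of the assignment matrix
def pvMOf : List Bool → Nat
  | [] => 0
  | b :: t => (if b then 1 else 0) + 2 * pvMOf t

def pvRowMask (a : List (List Bool)) (j : Nat) : Nat := pvMOf (a.getD j [])

-- compact restatement of A's search: same cell-by-cell recursion, but the only state
-- kept is the bitmask of the previous row and of the current row's prefix
def pvOk (seats : List (List String)) (row n col prev cur : Nat) : Bool :=
  (((seats.getD row []).getD col "") != "#")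
    && (decide (col = 0) || (!(cur.testBit (col - 1)) && !(prev.testBit (col - 1))))
    && !(prev.testBit (col + 1))

def pvG (seats : List (List String)) (m n row col prev cur : Nat) : Int :=
  if m ≤ row then 0
  else
    let ok := pvOk seats row n col prev cur
    let sameRow := col + 1 < n
    let nr := if sameRow then row else row + 1
    let nc := if sameRow then col + 1 else 0
    let prevSkip := if sameRow then prev else cur
    let curSkip := if sameRow then cur else 0
    let prevPl := if sameRow then prev else (cur ||| (2 ^ col))
    let curPl := if sameRow then (cur ||| (2 ^ col)) else 0
    let ms : Int := max 0 (pvG seats m n nr nc prevSkip curSkip)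
    if ok then max ms (1 + pvG seats m n nr nc prevPl curPl) else ms
termination_by (m - row, n - col)
decreasing_by all_goals (split_ifs <;> first | (apply Prod.Lex.right; omega) | (apply Prod.Lex.left; omega))

lemma testBit_pvMOf (l : List Bool) (i : Nat) : (pvMOf l).testBit i = l.getD i false := by
  induction l generalizing i with
  | nil => simp [pvMOf]
  | cons b t ih =>
    cases i with
    | zero =>
      cases b <;> simp [pvMOf, Nat.testBit_zero] <;> omega
    | succ i =>
      have h2 : ((if b then 1 else 0) + 2 * pvMOf t) / 2 = pvMOf t := by cases b <;> simp <;> omega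
      simp [pvMOf, Nat.testBit_add_one, h2, ih]

lemma pvMOf_zero (l : List Bool) (h : ∀ c, l.getD c false = false) : pvMOf l = 0 := by
  apply Nat.eq_of_testBit_eq
  intro i
  have := h i
  rw [List.getD_eq_getElem?_getD] at this
  simp [testBit_pvMOf, List.getD_eq_getElem?_getD, this]

lemma pvG_nonneg (seats : List (List String)) (m n row col prev cur : Nat) :
    0 ≤ pvG seats m n row col prev cur := by
  rw [pvG]
  by_cases h : m ≤ row
  · simp [h]
  · simp only [if_neg h]
    split_ifs <;> first
      | exact le_trans (le_max_left _ _) (le_max_left _ _)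
      | exact le_max_left _ _

def pvMx (l : List Int) : Int := l.foldr max 0

lemma pvMx_nonneg (l : List Int) : 0 ≤ pvMx l := by
  induction l with
  | nil => simp [pvMx]
  | cons x t ih => simp only [pvMx, List.foldr_cons] at *; omega

lemma max?_getD_nonneg (l : List Int) (h : ∀ x ∈ l, 0 ≤ x) : 0 ≤ (l.max?).getD 0 := by
  cases hmx : l.max? with
  | none => simp
  | some v =>
    have hv : v ∈ l := List.max?_mem hmx
    simpa using h v hv

theorem pvB_best_nonneg (m : Nat) (rowsMasks : List (List Nat)) (i prev : Nat) :
    0 ≤ pvB_best m rowsMasks i prev := by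
  rw [pvB_best]
  split_ifs with h
  · exact le_refl 0
  · apply max?_getD_nonneg
    intro x hx
    simp only [List.mem_map] at hx
    obtain ⟨mask, _, hveq⟩ := hx
    have := pvB_best_nonneg m rowsMasks (i + 1) mask
    omega
termination_by m - i
decreasing_by omega

lemma pvMx_eq_max?_getD (l : List Int) (h : ∀ x ∈ l, 0 ≤ x) :
    pvMx l = (l.max?).getD 0 := by
  induction l with
  | nil => simp [pvMx]
  | cons x t ih =>
    rw [List.max?_cons]
    cases hmx : t.max? with
    | none =>
      have ht : t = [] := List.max?_eq_none_iff.mp hmx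
      subst ht
      have hx := h x (by simp)
      simp [pvMx]
      omega
    | some b =>
      have ih' := ih (fun y hy => h y (by simp [hy]))
      rw [hmx] at ih'
      simp only [Option.getD_some, Option.elim] at ih' ⊢
      simp only [pvMx, List.foldr_cons] at *
      omega

lemma pvMx_filter_or (r : List Nat) (p q : Nat → Bool) (f : Nat → Int)
    (hdisj : ∀ x ∈ r, ¬(p x = true ∧ q x = true)) :
    pvMx ((r.filter (fun x => p x || q x)).map f)
      = max (pvMx ((r.filter p).map f)) (pvMx ((r.filter q).map f)) := by
  induction r with
  | nil => simp [pvMx]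
  | cons x t ih =>
    have ih' := ih (fun y hy => hdisj y (by simp [hy]))
    have hd := hdisj x (by simp)
    by_cases hp : p x = true <;> by_cases hq : q x = true
    · exact absurd ⟨hp, hq⟩ hd
    · simp only [List.filter_cons, hp, hq, Bool.or_true, Bool.true_or, if_pos, if_neg,
        Bool.false_eq_true, ite_true, ite_false, List.map_cons]
      simp only [pvMx, List.foldr_cons] at *
      omega
    · simp only [List.filter_cons, hp, hq, Bool.false_or, Bool.or_false, Bool.false_eq_true,
        ite_true, ite_false, List.map_cons]
      simp only [pvMx, List.foldr_cons] at *
      omega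
    · simp only [List.filter_cons, hp, hq, Bool.or_self, Bool.false_eq_true, ite_false]
      exact ih'


-- ---- list/getD helpers ----
lemma pvGetD_set_self {α : Type} (l : List α) (i : Nat) (x d : α) (h : i < l.length) :
    (l.set i x).getD i d = x := by
  simp [List.getD_eq_getElem?_getD, List.getElem?_set_self h]

lemma pvGetD_set_ne {α : Type} (l : List α) (i j : Nat) (x d : α) (h : i ≠ j) :
    (l.set i x).getD j d = l.getD j d := by
  simp [List.getD_eq_getElem?_getD, List.getElem?_set_ne h]

lemma pvGetD_default {α : Type} (l : List α) (i : Nat) (d : α) (h : l.length ≤ i) :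
    l.getD i d = d := by
  simp [List.getD_eq_getElem?_getD, List.getElem?_eq_none h]

lemma pvRowMask_set_ne (a : List (List Bool)) (row j : Nat) (r : List Bool) (h : row ≠ j) :
    pvRowMask (a.set row r) j = pvRowMask a j := by
  unfold pvRowMask
  rw [pvGetD_set_ne _ _ _ _ _ h]

lemma pvRowMask_update (a : List (List Bool)) (row col : Nat) (hrow : row < a.length)
    (hcol : col < (a.getD row []).length) :
    pvRowMask (a.set row ((a.getD row []).set col true)) row
      = pvRowMask a row ||| 2 ^ col := by
  unfold pvRowMask
  rw [pvGetD_set_self _ _ _ _ hrow]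
  apply Nat.eq_of_testBit_eq
  intro i
  rw [Nat.testBit_or, Nat.testBit_two_pow]
  by_cases hi : i = col
  · subst hi
    rw [testBit_pvMOf, pvGetD_set_self _ _ _ _ hcol]
    simp
  · rw [testBit_pvMOf, testBit_pvMOf, pvGetD_set_ne _ _ _ _ _ (fun hh => hi hh.symm)]
    have : ¬(col = i) := fun hh => hi hh.symm
    simp [this]

-- ---- bit helpers ----
lemma pv_and_eq_zero_iff (x y : Nat) :
    (x &&& y = 0) ↔ ∀ i, ¬(x.testBit i = true ∧ y.testBit i = true) := by
  constructor
  · intro h i ⟨hx, hy⟩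
    have := congrArg (fun z => z.testBit i) h
    simp [Nat.testBit_and, hx, hy] at this
  · intro h
    apply Nat.eq_of_testBit_eq
    intro i
    rw [Nat.testBit_and, Nat.zero_testBit]
    have := h i
    by_cases hx : x.testBit i <;> by_cases hy : y.testBit i <;> simp_all
lemma pv_testBit_ge (x i n : Nat) (h : x < 2 ^ n) (hi : n ≤ i) : x.testBit i = false :=
  Nat.testBit_eq_false_of_lt (lt_of_lt_of_le h (Nat.pow_le_pow_right (by omega) hi))

lemma pv_and_mask_eq_iff (msk k cur : Nat) (hcur : cur < 2 ^ k) :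
    (msk &&& (2 ^ k - 1) = cur) ↔ ∀ i, i < k → msk.testBit i = cur.testBit i := by
  constructor
  · intro h i hi
    have := congrArg (fun z => z.testBit i) h
    simpa [Nat.testBit_and, Nat.testBit_two_pow_sub_one, hi] using this
  · intro h
    apply Nat.eq_of_testBit_eq
    intro i
    rw [Nat.testBit_and, Nat.testBit_two_pow_sub_one]
    by_cases hi : i < k
    · simp [hi, h i hi]
    · simp [hi, pv_testBit_ge cur i k hcur (by omega)]

lemma pvPopcount_step (k : Nat) : pvPopcount k = k % 2 + pvPopcount (k / 2) := by
  rw [pvPopcount]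
  split_ifs with h
  · subst h; rw [pvPopcount]; norm_num
  · rfl

lemma pvPopcount_shift (msk col : Nat) :
    pvPopcount (msk >>> col) = (if msk.testBit col then 1 else 0) + pvPopcount (msk >>> (col + 1)) := by
  rw [pvPopcount_step (msk >>> col), Nat.shiftRight_succ]
  have ht : msk.testBit col = decide ((msk >>> col) % 2 = 1) := by
    rw [Nat.testBit_eq_decide_div_mod_eq, Nat.shiftRight_eq_div_pow]
  rw [ht]
  by_cases h : (msk >>> col) % 2 = 1 <;> simp [h] <;> omega

lemma pv_shiftRight_eq_zero (msk n : Nat) (h : msk < 2 ^ n) : msk >>> n = 0 := by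
  rw [Nat.shiftRight_eq_div_pow]
  exact Nat.div_eq_of_lt h

-- ---- mask-enumeration view of one row ----
def pvCond (seats : List (List String)) (row n col prev : Nat) (msk : Nat) : Bool :=
  (List.range n).all (fun c => !(decide (col ≤ c) && msk.testBit c) ||
    ((((seats.getD row []).getD c "") != "#")
      && (decide (c = 0) || (!(msk.testBit (c - 1)) && !(prev.testBit (c - 1))))
      && !(prev.testBit (c + 1))))

def pvCands (seats : List (List String)) (row n col prev cur : Nat) : List Nat :=
  (List.range (2 ^ n)).filter (fun msk =>
    (msk &&& ((2 ^ col) - 1) == cur) && pvCond seats row n col prev msk)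

lemma pv_range_filter_beq (N c : Nat) (h : c < N) :
    (List.range N).filter (fun x => x == c) = [c] := by
  induction N with
  | zero => omega
  | succ N ih =>
    rw [List.range_succ, List.filter_append]
    by_cases hc : c = N
    · subst hc
      have h1 : (List.range c).filter (fun x => x == c) = [] := by
        apply List.filter_eq_nil_iff.mpr
        intro x hx
        simp only [List.mem_range] at hx
        simp
        omega
      simp [h1]
    · have h2 : c < N := by omega
      rw [ih h2]
      simp
      omega

lemma pvCands_top (seats : List (List String)) (row n prev cur : Nat) (hcur : cur < 2 ^ n) :
    pvCands seats row n n prev cur = [cur] := by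
  unfold pvCands
  rw [List.filter_congr (l := List.range (2 ^ n)) (q := fun msk => msk == cur) ?_]
  · exact pv_range_filter_beq _ _ hcur
  · intro msk hmsk
    simp only [List.mem_range] at hmsk
    have hcond : pvCond seats row n n prev msk = true := by
      unfold pvCond
      rw [List.all_eq_true]
      intro c hc
      simp only [List.mem_range] at hc
      simp [show ¬(n ≤ c) by omega]
    rw [hcond, Bool.and_true]
    have hm : msk &&& (2 ^ n - 1) = msk := by
      rw [Nat.and_two_pow_sub_one_eq_mod]
      exact Nat.mod_eq_of_lt hmsk
    rw [hm]

lemma pvCond_iff (seats : List (List String)) (row n col' prev msk : Nat) :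
    pvCond seats row n col' prev msk = true ↔
    ∀ c, c < n → col' ≤ c → msk.testBit c = true →
      ((seats.getD row []).getD c "" ≠ "#" ∧
       (c = 0 ∨ (msk.testBit (c - 1) = false ∧ prev.testBit (c - 1) = false)) ∧
       prev.testBit (c + 1) = false) := by
  unfold pvCond
  rw [List.all_eq_true]
  constructor
  · intro h c hc hcc hm
    have h' := h c (List.mem_range.mpr hc)
    simp only [Bool.or_eq_true, Bool.and_eq_true, Bool.not_eq_true', Bool.and_eq_false_iff,
      decide_eq_true_eq, decide_eq_false_iff_not, bne_iff_ne, ne_eq] at h'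
    rcases h' with (h' | h') | h'
    · omega
    · rw [h'] at hm; exact absurd hm (by simp)
    · exact ⟨h'.1.1, h'.1.2, h'.2⟩
  · intro h c hcmem
    have hc := List.mem_range.mp hcmem
    simp only [Bool.or_eq_true, Bool.and_eq_true, Bool.not_eq_true', Bool.and_eq_false_iff,
      decide_eq_true_eq, decide_eq_false_iff_not, bne_iff_ne, ne_eq]
    by_cases hcc : col' ≤ c
    · by_cases hm : msk.testBit c = true
      · right; exact ⟨⟨(h c hc hcc hm).1, (h c hc hcc hm).2.1⟩, (h c hc hcc hm).2.2⟩
      · left; right; simpa using hm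
    · left; left; omega

lemma pvOk_iff (seats : List (List String)) (row n col prev cur : Nat) :
    pvOk seats row n col prev cur = true ↔
    ((seats.getD row []).getD col "" ≠ "#" ∧
     (col = 0 ∨ (cur.testBit (col - 1) = false ∧ prev.testBit (col - 1) = false)) ∧
     prev.testBit (col + 1) = false) := by
  unfold pvOk
  simp [Bool.or_eq_true, Bool.and_eq_true, Bool.not_eq_true', bne_iff_ne, and_assoc]

lemma pv_or_bit_ne (cur col i : Nat) (hi : i ≠ col) :
    (cur ||| 2 ^ col).testBit i = cur.testBit i := by
  have : ¬ col = i := fun h => hi h.symm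
  simp [Nat.testBit_or, Nat.one_shiftLeft, Nat.testBit_two_pow, this]

lemma pv_or_bit_self (cur col : Nat) : (cur ||| 2 ^ col).testBit col = true := by
  simp [Nat.testBit_or, Nat.one_shiftLeft, Nat.testBit_two_pow]

-- predicate split at one cell: the masks extending `cur` at columns ≥ col are the masks
-- extending `cur` at columns ≥ col+1 plus (when placing at col is allowed) those extending
-- `cur ||| 2^col` at columns ≥ col+1
lemma pvCands_split (seats : List (List String)) (row n col prev cur : Nat)
    (hcol : col < n) (hcur : cur < 2 ^ col) :
    ∀ msk, msk < 2 ^ n →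
    ((msk &&& ((2 ^ col) - 1) == cur) && pvCond seats row n col prev msk)
      = (((msk &&& ((2 ^ (col + 1)) - 1) == cur) && pvCond seats row n (col + 1) prev msk)
        || ((msk &&& ((2 ^ (col + 1)) - 1) == (cur ||| (2 ^ col)))
            && pvCond seats row n (col + 1) prev msk
            && pvOk seats row n col prev cur)) := by
  intro msk hmsk
  have hcur1 : cur < 2 ^ (col + 1) := lt_of_lt_of_le hcur (Nat.pow_le_pow_right (by omega) (by omega))
  have hpow : (2 : Nat) ^ col < 2 ^ (col + 1) := Nat.pow_lt_pow_right (by omega) (by omega)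
  have hor1 : cur ||| 2 ^ col < 2 ^ (col + 1) := Nat.or_lt_two_pow hcur1 hpow
  have hcurcol : cur.testBit col = false := Nat.testBit_eq_false_of_lt hcur
  have horbit_ne : ∀ i, i ≠ col → (cur ||| 2 ^ col).testBit i = cur.testBit i := fun i hi =>
    pv_or_bit_ne cur col i hi
  have horbit_self : (cur ||| 2 ^ col).testBit col = true := pv_or_bit_self cur col
  rw [Bool.eq_iff_iff]
  simp only [Bool.or_eq_true, Bool.and_eq_true, beq_iff_eq]
  rw [pv_and_mask_eq_iff msk col cur hcur, pv_and_mask_eq_iff msk (col + 1) cur hcur1,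
    pv_and_mask_eq_iff msk (col + 1) (cur ||| 2 ^ col) hor1,
    pvCond_iff, pvCond_iff, pvOk_iff]
  by_cases hb : msk.testBit col = true
  · constructor
    · rintro ⟨hP, hC⟩
      right
      refine ⟨⟨?_, ?_⟩, ?_⟩
      · intro i hi
        by_cases hic : i = col
        · subst hic
          rw [hb, horbit_self]
        · rw [horbit_ne i hic]
          exact hP i (by omega)
      · intro c hc hcc hm
        exact hC c hc (by omega) hm
      · obtain ⟨ho1, ho2, ho3⟩ := hC col (by omega) (le_refl col) hb
        refine ⟨ho1, ?_, ho3⟩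
        by_cases c0 : col = 0
        · left; exact c0
        · rcases ho2 with h | ⟨hm1, hp1⟩
          · left; exact h
          · right
            rw [← hP (col - 1) (by omega)]
            exact ⟨hm1, hp1⟩
    · rintro (⟨hQ, h1⟩ | ⟨⟨hR, h1⟩, hO⟩)
      · exfalso
        have := hQ col (by omega)
        rw [hb, hcurcol] at this
        simp at this
      · constructor
        · intro i hi
          rw [hR i (by omega), horbit_ne i (by omega)]
        · intro c hc hcc hm
          by_cases hcc' : c = col
          · subst hcc'
            obtain ⟨ho1, ho2, ho3⟩ := hO
            refine ⟨ho1, ?_, ho3⟩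
            by_cases c0 : c = 0
            · left; exact c0
            · rcases ho2 with h | ⟨hm1, hp1⟩
              · left; exact h
              · right
                refine ⟨?_, hp1⟩
                rw [hR (c - 1) (by omega), horbit_ne (c - 1) (by omega)]
                exact hm1
          · exact h1 c hc (by omega) hm
  · have hb' : msk.testBit col = false := by simpa using hb
    constructor
    · rintro ⟨hP, hC⟩
      left
      refine ⟨?_, ?_⟩
      · intro i hi
        by_cases hic : i = col
        · subst hic
          rw [hb', hcurcol]
        · exact hP i (by omega)
      · intro c hc hcc hm
        exact hC c hc (by omega) hm
    · rintro (⟨hQ, h1⟩ | ⟨⟨hR, h1⟩, hO⟩)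
      · constructor
        · intro i hi
          exact hQ i (by omega)
        · intro c hc hcc hm
          by_cases hcc' : c = col
          · subst hcc'
            rw [hb'] at hm
            exact absurd hm (by simp)
          · exact h1 c hc (by omega) hm
      · exfalso
        have := hR col (by omega)
        rw [hb', horbit_self] at this
        simp at this

-- the two sides of the split are disjoint
lemma pvCands_split_disjoint (cur col : Nat) (hcur : cur < 2 ^ col) :
    ∀ msk : Nat, ¬((msk &&& ((2 ^ (col + 1)) - 1) = cur)
        ∧ (msk &&& ((2 ^ (col + 1)) - 1) = cur ||| (2 ^ col))) := by
  intro msk ⟨h1, h2⟩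
  rw [h1] at h2
  have : (cur ||| 2 ^ col).testBit col = true := by
    simp [Nat.testBit_or, Nat.one_shiftLeft, Nat.testBit_two_pow]
  rw [← h2] at this
  simp [Nat.testBit_eq_false_of_lt hcur] at this

lemma pvMx_map_add_one (l : List Nat) (f : Nat → Int) (hne : l ≠ [])
    (hf : ∀ x ∈ l, 0 ≤ f x) :
    pvMx (l.map (fun x => 1 + f x)) = 1 + pvMx (l.map f) := by
  induction l with
  | nil => exact absurd rfl hne
  | cons x t ih =>
    by_cases ht : t = []
    · subst ht
      have := hf x (by simp)
      simp only [List.map_cons, List.map_nil, pvMx, List.foldr_cons, List.foldr_nil]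
      omega
    · have ih' := ih ht (fun y hy => hf y (by simp [hy]))
      simp only [List.map_cons, pvMx, List.foldr_cons] at ih' ⊢
      omega

-- membership witness: the mask `cur` itself extends `cur` trivially
lemma pvCands_self_mem (seats : List (List String)) (row n col prev cur : Nat)
    (hcur : cur < 2 ^ col) (hcoln : col ≤ n) :
    cur ∈ pvCands seats row n col prev cur := by
  unfold pvCands
  rw [List.mem_filter]
  have hltn : cur < 2 ^ n := lt_of_lt_of_le hcur (Nat.pow_le_pow_right (by omega) hcoln)
  refine ⟨List.mem_range.mpr hltn, ?_⟩
  rw [Bool.and_eq_true]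
  constructor
  · rw [beq_iff_eq, Nat.and_two_pow_sub_one_eq_mod]
    exact Nat.mod_eq_of_lt hcur
  · rw [pvCond_iff]
    intro c hc hcc hm
    exfalso
    have : cur.testBit c = false := pv_testBit_ge cur c col hcur (by omega)
    rw [this] at hm
    exact Bool.false_ne_true hm

-- within one row: A's cell recursion computes the max over all completions of the row
theorem pvG_row (seats : List (List String)) (m n : Nat) (rowsMasks : List (List Nat))
    (row : Nat) (hrow : row < m)
    (hnext : ∀ p, pvG seats m n (row + 1) 0 p 0 = pvB_best m rowsMasks (row + 1) p)
    (col prev cur : Nat) (hcol : col < n) (hcur : cur < 2 ^ col) :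
    pvG seats m n row col prev cur
      = pvMx ((pvCands seats row n col prev cur).map
          (fun msk => (pvPopcount (msk >>> col) : Int) + pvB_best m rowsMasks (row + 1) msk)) := by
  have hcur1 : cur ||| 2 ^ col < 2 ^ (col + 1) :=
    Nat.or_lt_two_pow
      (lt_of_lt_of_le hcur (Nat.pow_le_pow_right (by omega) (by omega)))
      (Nat.pow_lt_pow_right (by omega) (by omega))
  have hcur1' : cur < 2 ^ (col + 1) :=
    lt_of_lt_of_le hcur (Nat.pow_le_pow_right (by omega) (by omega))
  -- split the candidate list at bit `col`
  have hfilsplit : pvCands seats row n col prev cur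
      = (List.range (2 ^ n)).filter (fun msk =>
          ((msk &&& ((2 ^ (col + 1)) - 1) == cur) && pvCond seats row n (col + 1) prev msk)
          || ((msk &&& ((2 ^ (col + 1)) - 1) == (cur ||| (2 ^ col)))
              && pvCond seats row n (col + 1) prev msk
              && pvOk seats row n col prev cur)) := by
    unfold pvCands
    exact List.filter_congr (fun msk hm =>
      pvCands_split seats row n col prev cur hcol hcur msk (List.mem_range.mp hm))
  have hdisj : ∀ msk ∈ List.range (2 ^ n),
      ¬(((msk &&& ((2 ^ (col + 1)) - 1) == cur) && pvCond seats row n (col + 1) prev msk) = true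
        ∧ ((msk &&& ((2 ^ (col + 1)) - 1) == (cur ||| (2 ^ col)))
            && pvCond seats row n (col + 1) prev msk
            && pvOk seats row n col prev cur) = true) := by
    intro msk _ ⟨h1, h2⟩
    simp only [Bool.and_eq_true, beq_iff_eq] at h1 h2
    exact pvCands_split_disjoint cur col hcur msk ⟨h1.1, h2.1.1⟩
  have hMx := pvMx_filter_or (List.range (2 ^ n)) _ _
    (fun msk => (pvPopcount (msk >>> col) : Int) + pvB_best m rowsMasks (row + 1) msk) hdisj
  rw [hfilsplit, hMx]
  -- the unset-bit side is the candidate list at col+1 for cur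
  have hA_id : (List.range (2 ^ n)).filter
      (fun msk => (msk &&& ((2 ^ (col + 1)) - 1) == cur) && pvCond seats row n (col + 1) prev msk)
      = pvCands seats row n (col + 1) prev cur := rfl
  -- bit `col` is clear on the unset-bit side, set on the set-bit side
  have hbitA : ∀ msk ∈ pvCands seats row n (col + 1) prev cur, msk.testBit col = false := by
    intro msk hm
    unfold pvCands at hm
    rw [List.mem_filter, Bool.and_eq_true, beq_iff_eq] at hm
    have := (pv_and_mask_eq_iff msk (col + 1) cur hcur1').mp hm.2.1 col (by omega)
    rw [this]
    exact pv_testBit_ge cur col col hcur (le_refl col)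
  have hbitB : ∀ msk ∈ pvCands seats row n (col + 1) prev (cur ||| (2 ^ col)),
      msk.testBit col = true := by
    intro msk hm
    unfold pvCands at hm
    rw [List.mem_filter, Bool.and_eq_true, beq_iff_eq] at hm
    have := (pv_and_mask_eq_iff msk (col + 1) (cur ||| (2 ^ col)) hcur1).mp hm.2.1 col (by omega)
    rw [this]
    exact pv_or_bit_self cur col
  have hmapA : (pvCands seats row n (col + 1) prev cur).map
        (fun msk => (pvPopcount (msk >>> col) : Int) + pvB_best m rowsMasks (row + 1) msk)
      = (pvCands seats row n (col + 1) prev cur).map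
        (fun msk => (pvPopcount (msk >>> (col + 1)) : Int) + pvB_best m rowsMasks (row + 1) msk) := by
    apply List.map_congr_left
    intro msk hm
    rw [pvPopcount_shift msk col, hbitA msk hm]
    simp
  rw [hA_id, hmapA]
  rw [pvG]
  rw [if_neg (by omega : ¬ m ≤ row)]
  by_cases hok : pvOk seats row n col prev cur = true
  · -- placing at col is allowed: the set-bit side is the candidate list for cur ||| 2^col
    have hB_id : (List.range (2 ^ n)).filter
        (fun msk => (msk &&& ((2 ^ (col + 1)) - 1) == (cur ||| (2 ^ col)))
            && pvCond seats row n (col + 1) prev msk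
            && pvOk seats row n col prev cur)
        = pvCands seats row n (col + 1) prev (cur ||| (2 ^ col)) := by
      unfold pvCands
      apply List.filter_congr
      intro msk _
      rw [hok, Bool.and_true]
    have hmapB : (pvCands seats row n (col + 1) prev (cur ||| (2 ^ col))).map
          (fun msk => (pvPopcount (msk >>> col) : Int) + pvB_best m rowsMasks (row + 1) msk)
        = (pvCands seats row n (col + 1) prev (cur ||| (2 ^ col))).map
          (fun msk => 1 + ((pvPopcount (msk >>> (col + 1)) : Int) + pvB_best m rowsMasks (row + 1) msk)) := by
      apply List.map_congr_left
      intro msk hm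
      rw [pvPopcount_shift msk col, hbitB msk hm]
      push_cast
      ring_nf
      simp
    have hne : pvCands seats row n (col + 1) prev (cur ||| (2 ^ col)) ≠ [] :=
      List.ne_nil_of_mem (pvCands_self_mem seats row n (col + 1) prev _ hcur1 (by omega))
    have hfge : ∀ x ∈ pvCands seats row n (col + 1) prev (cur ||| (2 ^ col)),
        0 ≤ (pvPopcount (x >>> (col + 1)) : Int) + pvB_best m rowsMasks (row + 1) x := by
      intro x _
      have := pvB_best_nonneg m rowsMasks (row + 1) x
      positivity
    rw [hB_id, hmapB]
    simp only [Nat.cast_one]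
    rw [pvMx_map_add_one _ _ hne hfge]
    simp only [hok, if_true]
    by_cases hsr : col + 1 < n
    · have hIH1 := pvG_row seats m n rowsMasks row hrow hnext (col + 1) prev cur hsr hcur1'
      have hIH2 := pvG_row seats m n rowsMasks row hrow hnext (col + 1) prev (cur ||| (2 ^ col)) hsr hcur1
      simp only [if_pos hsr, hIH1, hIH2]
      have g1 := pvMx_nonneg ((pvCands seats row n (col + 1) prev cur).map
        (fun msk => (pvPopcount (msk >>> (col + 1)) : Int) + pvB_best m rowsMasks (row + 1) msk))
      omega
    · have hcoln : col + 1 = n := by omega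
      have htopA : pvCands seats row n (col + 1) prev cur = [cur] := by
        rw [hcoln]
        exact pvCands_top _ _ _ _ _ (by rw [← hcoln]; exact hcur1')
      have htopB : pvCands seats row n (col + 1) prev (cur ||| (2 ^ col)) = [cur ||| (2 ^ col)] := by
        rw [hcoln]
        exact pvCands_top _ _ _ _ _ (by rw [← hcoln]; exact hcur1)
      rw [htopA, htopB]
      have hz1 : cur >>> (col + 1) = 0 := pv_shiftRight_eq_zero _ _ hcur1'
      have hz2 : (cur ||| (2 ^ col)) >>> (col + 1) = 0 := pv_shiftRight_eq_zero _ _ hcur1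
      have hp0 : pvPopcount 0 = 0 := by rw [pvPopcount]; norm_num
      simp only [if_neg hsr, List.map_cons, List.map_nil, hz1, hz2, hp0, hnext cur,
        hnext (cur ||| (2 ^ col)), pvMx, List.foldr_cons, List.foldr_nil]
      have g1 := pvB_best_nonneg m rowsMasks (row + 1) cur
      have g2 := pvB_best_nonneg m rowsMasks (row + 1) (cur ||| (2 ^ col))
      push_cast
      omega
  · -- placing at col is not allowed: the set-bit side is empty
    have hB_id : (List.range (2 ^ n)).filter
        (fun msk => (msk &&& ((2 ^ (col + 1)) - 1) == (cur ||| (2 ^ col)))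
            && pvCond seats row n (col + 1) prev msk
            && pvOk seats row n col prev cur)
        = [] := by
      apply List.filter_eq_nil_iff.mpr
      intro msk _
      simp [Bool.and_eq_true, hok]
    rw [hB_id]
    simp only [List.map_nil, hok, if_false, Bool.false_eq_true]
    by_cases hsr : col + 1 < n
    · have hIH1 := pvG_row seats m n rowsMasks row hrow hnext (col + 1) prev cur hsr hcur1'
      simp only [if_pos hsr, hIH1]
      have g1 := pvMx_nonneg ((pvCands seats row n (col + 1) prev cur).map
        (fun msk => (pvPopcount (msk >>> (col + 1)) : Int) + pvB_best m rowsMasks (row + 1) msk))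
      simp only [pvMx, List.foldr_nil]
      omega
    · have hcoln : col + 1 = n := by omega
      have htopA : pvCands seats row n (col + 1) prev cur = [cur] := by
        rw [hcoln]
        exact pvCands_top _ _ _ _ _ (by rw [← hcoln]; exact hcur1')
      rw [htopA]
      have hz1 : cur >>> (col + 1) = 0 := pv_shiftRight_eq_zero _ _ hcur1'
      have hp0 : pvPopcount 0 = 0 := by rw [pvPopcount]; norm_num
      simp only [if_neg hsr, List.map_cons, List.map_nil, hz1, hp0, hnext cur, pvMx,
        List.foldr_cons, List.foldr_nil]
      have g1 := pvB_best_nonneg m rowsMasks (row + 1) cur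
      push_cast
      omega
termination_by n - col
decreasing_by all_goals omega

-- at the start of a row, the candidate list is exactly B's valid-and-compatible mask list
lemma pv_bit0 (msk c : Nat) : ((msk >>> c) &&& 1 == 0) = !msk.testBit c := by
  rw [Nat.and_one_is_mod, Nat.shiftRight_eq_div_pow, Nat.testBit_eq_decide_div_mod_eq]
  by_cases h : msk / 2 ^ c % 2 = 1 <;> simp [h] <;> omega

lemma pvCands_zero (seats : List (List String)) (row n prev : Nat) :
    pvCands seats row n 0 prev 0
      = (pvB_validMasks n (seats.getD row [])).filter (fun mask =>
          (mask &&& (prev <<< 1) == 0) && (mask &&& (prev >>> 1) == 0)) := by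
  unfold pvCands pvB_validMasks
  rw [Nat.one_shiftLeft, List.filter_filter]
  apply List.filter_congr
  intro msk hm
  have hmsk := List.mem_range.mp hm
  have hms : ∀ i, n ≤ i → msk.testBit i = false := fun i hi => pv_testBit_ge msk i n hmsk hi
  have h0 : msk &&& (2 ^ 0 - 1) = 0 := by simp
  have hallopen : ((List.range n).all fun c =>
        ((msk >>> c) &&& 1 == 0) || ((seats.getD row []).getD c "" != "#")) = true
      ↔ ∀ c, c < n → msk.testBit c = true → (seats.getD row []).getD c "" ≠ "#" := by
    rw [List.all_eq_true]
    constructor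
    · intro h c hc hb
      have h' := h c (List.mem_range.mpr hc)
      simp only [pv_bit0, hb, Bool.not_true, Bool.false_or, bne_iff_ne] at h'
      exact h'
    · intro h c hcm
      have hc := List.mem_range.mp hcm
      rw [Bool.or_eq_true, pv_bit0, Bool.not_eq_true']
      by_cases hb : msk.testBit c = true
      · right; rw [bne_iff_ne]; exact h c hc hb
      · left; simpa using hb
  have hshl : ∀ (p : Nat), (msk &&& p <<< 1 = 0)
      ↔ ∀ c, msk.testBit c = true → 1 ≤ c → p.testBit (c - 1) = false := by
    intro p
    rw [pv_and_eq_zero_iff]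
    constructor
    · intro h c hb hc1
      by_cases hp : p.testBit (c - 1) = true
      · exfalso
        exact h c ⟨hb, by rw [Nat.testBit_shiftLeft]; simp [show 1 ≤ c from hc1, hp]⟩
      · simpa using hp
    · intro h c ⟨h1, h2⟩
      rw [Nat.testBit_shiftLeft, Bool.and_eq_true, decide_eq_true_eq] at h2
      have := h c h1 h2.1
      rw [this] at h2
      exact Bool.false_ne_true h2.2
  have hshr : (msk &&& prev >>> 1 = 0)
      ↔ ∀ c, msk.testBit c = true → prev.testBit (c + 1) = false := by
    rw [pv_and_eq_zero_iff]
    constructor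
    · intro h c hb
      by_cases hp : prev.testBit (c + 1) = true
      · exfalso
        exact h c ⟨hb, by rw [Nat.testBit_shiftRight, Nat.add_comm]; exact hp⟩
      · simpa using hp
    · intro h c ⟨h1, h2⟩
      rw [Nat.testBit_shiftRight, Nat.add_comm] at h2
      have := h c h1
      rw [this] at h2
      exact Bool.false_ne_true h2
  rw [Bool.eq_iff_iff]
  simp only [Bool.and_eq_true, beq_iff_eq]
  rw [pvCond_iff]
  constructor
  · rintro ⟨_, hC⟩
    refine ⟨⟨(hshl prev).mpr ?_, hshr.mpr ?_⟩, (hshl msk).mpr ?_, hallopen.mpr ?_⟩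
    · intro c hb hc1
      by_cases hcn : c < n
      · obtain ⟨_, h2, _⟩ := hC c hcn (by omega) hb
        rcases h2 with h2 | ⟨_, hp⟩
        · omega
        · exact hp
      · rw [hms c (by omega)] at hb
        exact absurd hb (by simp)
    · intro c hb
      by_cases hcn : c < n
      · exact (hC c hcn (by omega) hb).2.2
      · rw [hms c (by omega)] at hb
        exact absurd hb (by simp)
    · intro c hb hc1
      by_cases hcn : c < n
      · obtain ⟨_, h2, _⟩ := hC c hcn (by omega) hb
        rcases h2 with h2 | ⟨hmm, _⟩
        · omega
        · exact hmm
      · rw [hms c (by omega)] at hb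
        exact absurd hb (by simp)
    · intro c hc hb
      exact (hC c hc (by omega) hb).1
  · rintro ⟨⟨hL, hR⟩, hAdj, hOp⟩
    refine ⟨h0, ?_⟩
    intro c hc _ hb
    refine ⟨hallopen.mp hOp c hc hb, ?_, hshr.mp hR c hb⟩
    by_cases c0 : c = 0
    · left; exact c0
    · right
      exact ⟨(hshl msk).mp hAdj c hb (by omega), (hshl prev).mp hL c hb (by omega)⟩

-- row-by-row: A's compact recursion equals B's recursion over row masks
theorem pvG_eq_best (seats : List (List String)) (m n : Nat) (rowsMasks : List (List Nat))
    (hm : m = seats.length) (hn : 0 < n)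
    (hrm : rowsMasks = seats.map (fun r => pvB_validMasks n r)) (row prev : Nat) :
    pvG seats m n row 0 prev 0 = pvB_best m rowsMasks row prev := by
  by_cases hrow : m ≤ row
  · rw [pvG, pvB_best]
    simp [hrow]
  · have hnext : ∀ p, pvG seats m n (row + 1) 0 p 0 = pvB_best m rowsMasks (row + 1) p :=
      fun p => pvG_eq_best seats m n rowsMasks hm hn hrm (row + 1) p
    have hG := pvG_row seats m n rowsMasks row (by omega) hnext 0 prev 0 hn (by norm_num)
    rw [hG, pvB_best, if_neg hrow]
    have hlt : row < seats.length := by omega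
    have hgm : rowsMasks.getD row [] = pvB_validMasks n (seats.getD row []) := by
      rw [hrm, List.getD_eq_getElem?_getD, List.getElem?_map, List.getElem?_eq_getElem hlt,
        List.getD_eq_getElem?_getD, List.getElem?_eq_getElem hlt]
      rfl
    rw [hgm, pvCands_zero seats row n prev]
    rw [pvMx_eq_max?_getD]
    · apply congrArg (fun l => (List.max? l).getD (0 : Int))
      apply List.map_congr_left
      intro msk _
      rw [Nat.shiftRight_zero]
    · intro x hx
      rw [List.mem_map] at hx
      obtain ⟨msk, _, hx⟩ := hx
      have := pvB_best_nonneg m rowsMasks (row + 1) msk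
      rw [← hx]
      positivity
termination_by m - row
decreasing_by omega

-- A's validity test in terms of the row masks
lemma pvA_isValid_eq (seats : List (List String)) (m n row col : Nat) (a : List (List Bool))
    (hrow : row < m) (hcol : col < n)
    (hlen : ∀ j, j < m → (a.getD j []).length = n)
    (hz : ∀ c, col ≤ c → pvGet a row c = false) :
    pvA_isValid seats m n row col a
      = pvOk seats row n col (if row = 0 then 0 else pvRowMask a (row - 1)) (pvRowMask a row) := by
  have hcur : ∀ i, (pvRowMask a row).testBit i = pvGet a row i := by
    intro i; unfold pvRowMask pvGet; rw [testBit_pvMOf]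
  have hprevbit : ∀ i, (if row = 0 then (0 : Nat) else pvRowMask a (row - 1)).testBit i
      = (if row = 0 then false else pvGet a (row - 1) i) := by
    intro i
    by_cases h0 : row = 0
    · simp [h0]
    · simp only [if_neg h0]; unfold pvRowMask pvGet; rw [testBit_pvMOf]
  have e1 : ((row : Int) + -1).toNat = row - 1 := by omega
  have e2 : ((col : Int) + -1).toNat = col - 1 := by omega
  have hpvget : ∀ j c, (a[j]?.getD [])[c]?.getD false = pvGet a j c := by
    intro j c; unfold pvGet; simp [List.getD_eq_getElem?_getD]
  unfold pvA_isValid pvOk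
  by_cases hseat : (seats[row]?.getD [])[col]?.getD "" = "#"
  · simp [hseat, List.getD_eq_getElem?_getD]
  · have hsb : (((seats[row]?.getD [])[col]?.getD "") != "#") = true := by simp [bne, hseat]
    have hsb' : (((seats[row]?.getD [])[col]?.getD "") == "#") = false := by simp [hseat]
    simp only [List.getD_eq_getElem?_getD, hsb, hsb', if_false, Bool.false_eq_true, Bool.true_and,
      List.any_cons, List.any_nil, Bool.or_false, e1, e2, hpvget, hcur, hprevbit]
    have dA : decide (0 ≤ (row : Int) + -1) = decide (1 ≤ row) := decide_eq_decide.mpr (by omega)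
    have dB : decide ((row : Int) + -1 < (m : Int)) = true := by simp; omega
    have dC : decide (0 ≤ (col : Int) + -1) = decide (1 ≤ col) := decide_eq_decide.mpr (by omega)
    have dD : decide ((col : Int) + -1 < (n : Int)) = true := by simp; omega
    have dE : decide (0 ≤ (col : Int) + 1) = true := by simp; omega
    have dF : decide ((col : Int) + 1 < (n : Int)) = decide (col + 1 < n) := decide_eq_decide.mpr (by omega)
    have dG : decide ((row : Int) < (m : Int)) = true := by simp; omega
    have dH : decide (0 ≤ (row : Int) + 0) = true := by simp
    have dI : decide ((row : Int) + 0 < (m : Int)) = true := by simp; omega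
    have hpv1 : pvGet a row (col + 1) = false := hz (col + 1) (by omega)
    have hpvhigh : ¬ row = 0 → ¬ col + 1 < n → pvGet a (row - 1) (col + 1) = false := by
      intro h0 hcn
      unfold pvGet
      rw [pvGetD_default _ _ _ (by rw [hlen (row - 1) (by omega)]; omega)]
    simp only [dA, dB, dC, dD, dE, dF, dG, dH, dI, hpv1, Bool.and_true, Bool.true_and,
      Bool.and_false, Bool.false_and, Bool.or_false, Bool.false_or]
    by_cases h0 : row = 0
    · subst h0
      by_cases c0 : col = 0
      · subst c0
        cases hC : pvGet a 0 (0 - 1) <;> simp [hC, hz]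
      · cases hC : pvGet a 0 (col - 1) <;> simp [c0, hC, hz] <;> omega
    · have hr1 : decide (1 ≤ row) = true := by simp; omega
      by_cases hcn : col + 1 < n
      · by_cases c0 : col = 0
        · subst c0
          cases hB : pvGet a (row - 1) 1 <;>
            simp [h0, hcn, hB, hr1, hz]
        · have hc1 : decide (1 ≤ col) = true := by simp; omega
          cases hA : pvGet a (row - 1) (col - 1) <;> cases hB : pvGet a (row - 1) (col + 1) <;>
            cases hC : pvGet a row (col - 1) <;>
            simp [h0, c0, hcn, hA, hB, hC, hr1, hc1, hpv1, hz]
      · have hBf' : pvGet a (row - 1) (col + 1) = false := hpvhigh h0 hcn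
        by_cases c0 : col = 0
        · subst c0
          have hBf : pvGet a (row - 1) 1 = false := hBf'
          simp [h0, hcn, hBf, hr1, hz]
        · have hc1 : decide (1 ≤ col) = true := by simp; omega
          cases hA : pvGet a (row - 1) (col - 1) <;> cases hC : pvGet a row (col - 1) <;>
            simp [h0, c0, hcn, hA, hC, hBf', hr1, hc1, hz]

-- A's backtracking equals the compact recursion
theorem pvA_eq_pvG (seats : List (List String)) (m n : Nat) (row col : Nat)
    (a : List (List Bool)) (count : Int)
    (hal : a.length = m) (hlen : ∀ j, j < m → (a.getD j []).length = n)
    (hzr : ∀ j c, row < j → pvGet a j c = false)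
    (hzc : ∀ c, col ≤ c → pvGet a row c = false)
    (hcol : col < n) (hcount : 0 ≤ count) :
    pvA_backtrack seats m n row col a count
      = count + pvG seats m n row col (if row = 0 then 0 else pvRowMask a (row - 1)) (pvRowMask a row) := by
  rw [pvA_backtrack, pvG]
  by_cases hrow : m ≤ row
  · simp [hrow]
  · simp only [if_neg hrow]
    have hok := pvA_isValid_eq seats m n row col a (by omega) hcol hlen hzc
    -- facts about the updated matrix (used by the place branch)
    have hsetlen : row < a.length := by omega
    have hinlen : col < (a.getD row []).length := by rw [hlen row (by omega)]; omega
    have hlen' : ∀ j, j < m → ((a.set row ((a.getD row []).set col true)).getD j []).length = n := by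
      intro j hj
      by_cases hjr : j = row
      · subst hjr
        rw [pvGetD_set_self _ _ _ _ hsetlen, List.length_set]
        exact hlen j hj
      · rw [pvGetD_set_ne _ _ _ _ _ (fun hh => hjr hh.symm)]
        exact hlen j hj
    have hzr' : ∀ j c, row < j → pvGet (a.set row ((a.getD row []).set col true)) j c = false := by
      intro j c hj
      unfold pvGet
      rw [pvGetD_set_ne _ _ _ _ _ (by omega)]
      exact hzr j c hj
    have hzc' : ∀ c, col + 1 ≤ c → pvGet (a.set row ((a.getD row []).set col true)) row c = false := by
      intro c hc
      unfold pvGet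
      rw [pvGetD_set_self _ _ _ _ hsetlen, pvGetD_set_ne _ _ _ _ _ (by omega)]
      exact hzc c (by omega)
    have hmask' : pvRowMask (a.set row ((a.getD row []).set col true)) row
        = pvRowMask a row ||| 2 ^ col := pvRowMask_update a row col hsetlen hinlen
    have hprevsame : ∀ j, j ≠ row →
        pvRowMask (a.set row ((a.getD row []).set col true)) j = pvRowMask a j := by
      intro j hj
      exact pvRowMask_set_ne a row j _ (fun hh => hj hh.symm)
    by_cases hsr : col + 1 < n
    · -- stay in the same row
      have hIH1 := pvA_eq_pvG seats m n row (col + 1) a count hal hlen hzr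
        (fun c hc => hzc c (by omega)) hsr hcount
      have hIH2 := pvA_eq_pvG seats m n row (col + 1)
        (a.set row ((a.getD row []).set col true)) (count + 1)
        (by rw [List.length_set]; exact hal) hlen' hzr' hzc' hsr (by omega)
      rw [hmask'] at hIH2
      have hprevsame' : (if row = 0 then 0 else pvRowMask (a.set row ((a.getD row []).set col true)) (row - 1))
          = (if row = 0 then 0 else pvRowMask a (row - 1)) := by
        by_cases h0 : row = 0
        · simp [h0]
        · simp only [if_neg h0]
          exact hprevsame (row - 1) (by omega)
      rw [hprevsame'] at hIH2
      simp only [if_pos hsr, hok, hIH1, hIH2]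
      by_cases hokb : pvOk seats row n col (if row = 0 then 0 else pvRowMask a (row - 1)) (pvRowMask a row) = true
      · simp only [hokb, if_true]
        have g1 := pvG_nonneg seats m n row (col + 1) (if row = 0 then 0 else pvRowMask a (row - 1)) (pvRowMask a row)
        have g2 := pvG_nonneg seats m n row (col + 1) (if row = 0 then 0 else pvRowMask a (row - 1)) (pvRowMask a row ||| 2 ^ col)
        omega
      · simp only [hokb, if_false, Bool.false_eq_true]
        have g1 := pvG_nonneg seats m n row (col + 1) (if row = 0 then 0 else pvRowMask a (row - 1)) (pvRowMask a row)
        omega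
    · -- move to the next row
      have hnz : pvRowMask a (row + 1) = 0 := by
        unfold pvRowMask
        apply pvMOf_zero
        intro c
        exact hzr (row + 1) c (by omega)
      have hnz' : pvRowMask (a.set row ((a.getD row []).set col true)) (row + 1) = 0 := by
        unfold pvRowMask
        apply pvMOf_zero
        intro c
        exact hzr' (row + 1) c (by omega)
      have hIH1 := pvA_eq_pvG seats m n (row + 1) 0 a count hal hlen
        (fun j c hj => hzr j c (by omega)) (fun c _ => hzr (row + 1) c (by omega)) (by omega) hcount
      have hIH2 := pvA_eq_pvG seats m n (row + 1) 0
        (a.set row ((a.getD row []).set col true)) (count + 1)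
        (by rw [List.length_set]; exact hal) hlen' (fun j c hj => hzr' j c (by omega))
        (fun c _ => hzr' (row + 1) c (by omega)) (by omega) (by omega)
      simp only [Nat.add_sub_cancel, Nat.succ_ne_zero, if_false, hnz, hnz', hmask'] at hIH1 hIH2
      simp only [if_neg hsr, hok, hIH1, hIH2]
      by_cases hokb : pvOk seats row n col (if row = 0 then 0 else pvRowMask a (row - 1)) (pvRowMask a row) = true
      · simp only [hokb, if_true]
        have g1 := pvG_nonneg seats m n (row + 1) 0 (pvRowMask a row) 0
        have g2 := pvG_nonneg seats m n (row + 1) 0 (pvRowMask a row ||| 2 ^ col) 0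
        omega
      · simp only [hokb, if_false, Bool.false_eq_true]
        have g1 := pvG_nonneg seats m n (row + 1) 0 (pvRowMask a row) 0
        omega
termination_by (m - row, n - col)
decreasing_by all_goals (first | (apply Prod.Lex.right; omega) | (apply Prod.Lex.left; omega))

-- ===== VERDICT (by name: the statement is the Claim_ definition above) =====
theorem maxStudents_approach1_backtracking_complete_spec : Claim_equal_maxStudents_approach1_backtracking_complete := by
  intro seats _ hpre
  obtain ⟨hne, hn, hrows⟩ := hpre
  unfold Spec_maxStudents_approach1_backtracking_complete
  show maxStudents_approach1_backtracking_complete seats = maxStudents_approach1_backtracking_complete_alt seats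
  unfold maxStudents_approach1_backtracking_complete maxStudents_approach1_backtracking_complete_alt
  set m := seats.length with hm
  set n := (seats.getD 0 []).length with hnn
  have hrep : ∀ j, j < m → ((List.replicate m (List.replicate n false)).getD j []).length = n := by
    intro j hj
    rw [List.getD_replicate _ hj, List.length_replicate]
  have hfalse : ∀ j c, pvGet (List.replicate m (List.replicate n false)) j c = false := by
    intro j c
    unfold pvGet
    by_cases hj : j < m
    · rw [List.getD_replicate _ hj]
      by_cases hc : c < n
      · rw [List.getD_replicate _ hc]
      · rw [pvGetD_default _ _ _ (by rw [List.length_replicate]; omega)]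
    · have houter : (List.replicate m (List.replicate n false)).getD j [] = [] :=
        pvGetD_default _ _ _ (by rw [List.length_replicate]; omega)
      rw [houter]
      simp
  have hmask0 : pvRowMask (List.replicate m (List.replicate n false)) 0 = 0 := by
    unfold pvRowMask
    apply pvMOf_zero
    intro c
    exact hfalse 0 c
  have hA := pvA_eq_pvG seats m n 0 0 (List.replicate m (List.replicate n false)) 0
    (by simp) hrep (fun j c _ => hfalse j c) (fun c _ => hfalse 0 c) hn (le_refl 0)
  simp only [if_pos rfl, hmask0] at hA
  rw [hA, zero_add]
  exact pvG_eq_best seats m n (seats.map (fun r => pvB_validMasks n r)) hm hn rfl 0 0
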